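-- pv_equiv track=rewrite | github.com/Carolinebaby/AIProject | E2/code/experiment2_additional_question/main.py | is_var
-- ===== SOURCE A (Python) =====
-- variables = ['p', 'q', 'r', 's', 't', 'u', 'v', 'w', 'x', 'y', 'z']
--
-- def is_var(para: str):
--     func_flag, var_pos = is_function(para)
--     if func_flag:
--         temp = ""
--         while para[var_pos] != ")":
--             temp += para[var_pos]
--             var_pos += 1
--         if temp in variables:
--             return True, temp
--     else:
--         if para in variables:
--             return True, para
--
--     return False, ""
--
-- def is_function(arg):
--     if len(arg) < 4:  # 字符串长度小于 4 直接排除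
--         return False, -1
--     temp = ""
--     pos = 0
--     stack = []
--     while pos < len(arg):
--         if arg[pos] == "(":
--             stack.append("(")
--             temp = ""
--         elif arg[pos] == ")":
--             # 到达第一个 ),首先说明有函数，并且 ) 前面的字符串为变量或常量
--             # temp 表示函数里面的 变量或常量
--             # pos-len(temp) 表示 函数中的变量或常量所在的位置
--             return True, pos-len(temp)
--         else:
--             temp += arg[pos]
--         pos += 1
--     return False, -1
-- ===== SOURCE B (Python) =====
-- variables = ['p', 'q', 'r', 's', 't', 'u', 'v', 'w', 'x', 'y', 'z']
--
-- def is_var(para: str):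
--     rp = para.find(')')
--     if rp == -1 or len(para) < 4:
--         # non-function case: the whole string must be a variable
--         return (True, para) if para in variables else (False, "")
--     lp = para.rfind('(', 0, rp)
--     content = para[lp + 1:rp]  # lp == -1 gives para[0:rp], matching A's reset-on-'(' scan
--     return (True, content) if content in variables else (False, "")
-- ===== Notes on version B (the rewrite author's own statement) =====
-- stated objective: faster
-- what changed: Replaces the two-phase character-by-character scan (is_function accumulating a temp string to locate the content start, then a second accumulation loop re-extracting it) with direct index arithmetic: find the first closing parenthesis, rfind the last opening parenthesis before it, and slice the content out in one step.
import Mathlib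
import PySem

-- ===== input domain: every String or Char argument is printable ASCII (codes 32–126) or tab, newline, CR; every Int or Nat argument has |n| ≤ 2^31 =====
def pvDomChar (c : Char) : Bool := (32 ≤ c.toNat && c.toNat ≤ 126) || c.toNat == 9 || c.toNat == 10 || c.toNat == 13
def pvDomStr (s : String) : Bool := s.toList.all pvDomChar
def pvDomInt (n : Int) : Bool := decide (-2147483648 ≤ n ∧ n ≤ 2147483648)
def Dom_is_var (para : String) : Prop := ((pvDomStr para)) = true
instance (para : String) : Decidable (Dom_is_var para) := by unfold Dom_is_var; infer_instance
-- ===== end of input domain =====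

-- B replaces A's two char-by-char accumulation loops (locate the content start, then re-extract it)
-- with direct index computation: find the first closing paren, rfind the last opening paren before
-- it, slice the content out. (objective: faster — a timing run measured B faster at large sizes)

def pyVariables : List String := ["p", "q", "r", "s", "t", "u", "v", "w", "x", "y", "z"]

-- ===== PORT A =====
-- the while loop of is_function: pos/temp/stack are the Python locals
def isFuncLoop (arg : List Char) (pos : Nat) (temp : List Char) (stack : List Char) : Bool × Int :=
  if h : pos < arg.length then
    if arg[pos] = '(' then isFuncLoop arg (pos + 1) [] (stack ++ ['('])
    else if arg[pos] = ')' then (true, (pos : Int) - (temp.length : Int))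
    else isFuncLoop arg (pos + 1) (temp ++ [arg[pos]]) stack
  else (false, -1)
termination_by arg.length - pos

def is_function (arg : List Char) : Bool × Int :=
  if arg.length < 4 then (false, -1) else isFuncLoop arg 0 [] []

-- the inner while loop of is_var; Python's para[pos] would raise IndexError past the end,
-- which is unreachable on the calls is_var makes (a ')' always lies at or after pos)
def isVarLoop (para : List Char) (pos : Nat) (temp : List Char) : List Char :=
  if h : pos < para.length then
    if para[pos] = ')' then temp
    else isVarLoop para (pos + 1) (temp ++ [para[pos]])
  else temp
termination_by para.length - pos

def is_var (para : String) : Bool × String :=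
  let r := is_function para.toList
  if r.1 then
    -- r.2 = pos - len(temp) ≥ 0 whenever r.1 = true, so toNat is exact here
    let temp := String.ofList (isVarLoop para.toList r.2.toNat [])
    if temp ∈ pyVariables then (true, temp) else (false, "")
  else
    if para ∈ pyVariables then (true, para) else (false, "")

-- ===== PORT B =====
def is_var_alt (para : String) : Bool × String :=
  let s := para.toList
  let rp := PySem.Chars.find s [')']                                -- para.find(')')
  if rp = -1 ∨ s.length < 4 then
    if para ∈ pyVariables then (true, para) else (false, "")
  else
    let lp := PySem.Chars.rfindFrom s ['('] 0 (some rp)             -- para.rfind('(', 0, rp)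
    let content := String.ofList (PySem.List.slice s (some (lp + 1)) (some rp))  -- para[lp+1:rp]
    if content ∈ pyVariables then (true, content) else (false, "")

-- ===== PRECONDITION & SPEC =====
def Spec_is_var (para : String) (out : Bool × String) : Prop := out = is_var_alt para
instance (para : String) (out : Bool × String) : Decidable (Spec_is_var para out) := by unfold Spec_is_var; infer_instance

-- ===== CLAIM (what is proved, stated in full; the proofs are below) =====
def Claim_equal_is_var : Prop := ∀ (para : String), Dom_is_var para → Spec_is_var para (is_var para)

-- ===== LEMMAS AND PROOFS =====

-- first occurrence of a character
theorem pv_exists_first (s : List Char) (c : Char) (h : c ∈ s) :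
    ∃ rp : Nat, s[rp]? = some c ∧ ∀ i, i < rp → s[i]? ≠ some c := by
  induction s with
  | nil => cases h
  | cons x t ih =>
    by_cases hx : x = c
    · exact ⟨0, by simp [hx], by intro i hi; omega⟩
    · have ht : c ∈ t := by
        rcases List.mem_cons.mp h with h' | h'
        · exact absurd h'.symm hx
        · exact h'
      obtain ⟨rp, h1, h2⟩ := ih ht
      refine ⟨rp + 1, by simpa using h1, ?_⟩
      intro i hi
      cases i with
      | zero => simpa using hx
      | succ j => simpa using h2 j (by omega)

-- last occurrence of a character
theorem pv_exists_last (t : List Char) (c : Char) (h : c ∈ t) :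
    ∃ m : Nat, t[m]? = some c ∧ ∀ i, m < i → t[i]? ≠ some c := by
  induction t with
  | nil => cases h
  | cons x r ih =>
    by_cases hr : c ∈ r
    · obtain ⟨m, h1, h2⟩ := ih hr
      refine ⟨m + 1, by simpa using h1, ?_⟩
      intro i hi
      cases i with
      | zero => omega
      | succ j => simpa using h2 j (by omega)
    · have hx : x = c := by
        rcases List.mem_cons.mp h with h' | h'
        · exact h'.symm
        · exact absurd h' hr
      refine ⟨0, by simp [hx], ?_⟩
      intro i hi
      cases i with
      | zero => omega
      | succ j =>
        simp only [List.getElem?_cons_succ]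
        intro hc
        obtain ⟨hj, hje⟩ := List.getElem?_eq_some_iff.mp hc
        exact hr (hje ▸ List.getElem_mem hj)

theorem pv_sing_prefix (c : Char) (l : List Char) : ([c].isPrefixOf l = true) ↔ l[0]? = some c := by
  cases l with
  | nil => simp [List.isPrefixOf]
  | cons x r =>
    constructor
    · intro hb
      have hcx : c = x := by simpa [List.isPrefixOf] using hb
      simp [hcx]
    · intro hb
      have hxc : x = c := by simpa using hb
      simp [List.isPrefixOf, hxc]

-- ===== characterization of Chars.find on a single character =====
theorem pv_find_go_some (c : Char) :
    ∀ (s : List Char) (k rp : Nat), s[rp]? = some c → (∀ i, i < rp → s[i]? ≠ some c) →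
      PySem.Chars.find.go [c] s k = ((k + rp : Nat) : Int) := by
  intro s
  induction s with
  | nil => intro k rp h1 _; simp at h1
  | cons x t ih =>
    intro k rp h1 h2
    rw [PySem.Chars.find.go]
    cases rp with
    | zero =>
      have hx : x = c := by simpa using h1
      have hpre : ([c].isPrefixOf (x :: t)) = true := (pv_sing_prefix c _).mpr (by simp [hx])
      rw [if_pos hpre]
      simp
    | succ j =>
      have hx' : ((x :: t)[0]?) ≠ some c := h2 0 (by omega)
      have hpre : ¬ (([c].isPrefixOf (x :: t)) = true) := fun hb => hx' ((pv_sing_prefix c _).mp hb)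
      rw [if_neg hpre]
      have := ih (k + 1) j (by simpa using h1) (fun i hi => by simpa using h2 (i + 1) (by omega))
      rw [this]
      push_cast
      ring

theorem pv_find_go_none (c : Char) :
    ∀ (s : List Char) (k : Nat), c ∉ s → PySem.Chars.find.go [c] s k = -1 := by
  intro s
  induction s with
  | nil => intro k _; rw [PySem.Chars.find.go]; simp
  | cons x t ih =>
    intro k h
    rw [PySem.Chars.find.go]
    have hx' : ((x :: t)[0]?) ≠ some c := by
      simp only [List.getElem?_cons_zero]
      intro he
      exact h (by simp [Option.some.inj he])
    have hpre : ¬ (([c].isPrefixOf (x :: t)) = true) := fun hb => hx' ((pv_sing_prefix c _).mp hb)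
    rw [if_neg hpre]
    exact ih (k + 1) (fun hm => h (List.mem_cons_of_mem _ hm))

theorem pv_find_some (s : List Char) (c : Char) (rp : Nat) (h1 : s[rp]? = some c)
    (h2 : ∀ i, i < rp → s[i]? ≠ some c) : PySem.Chars.find s [c] = (rp : Int) := by
  unfold PySem.Chars.find
  have := pv_find_go_some c s 0 rp h1 h2
  simpa using this

theorem pv_find_none (s : List Char) (c : Char) (h : c ∉ s) : PySem.Chars.find s [c] = -1 := by
  unfold PySem.Chars.find
  exact pv_find_go_none c s 0 h

-- ===== characterization of Chars.rfind on a single character =====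
theorem pv_rfind_go_none (t : List Char) (c : Char) (h : c ∉ t) :
    ∀ j : Nat, PySem.Chars.rfind.go t [c] j = -1 := by
  intro j
  induction j with
  | zero =>
    rw [PySem.Chars.rfind.go]
    have hpre : ¬ (([c].isPrefixOf t) = true) := by
      intro hb
      have h0 := (pv_sing_prefix c t).mp hb
      obtain ⟨hl, he⟩ := List.getElem?_eq_some_iff.mp h0
      exact h (he ▸ List.getElem_mem hl)
    rw [if_neg hpre]
  | succ j ih =>
    rw [PySem.Chars.rfind.go]
    have hpre : ¬ (([c].isPrefixOf (t.drop (j + 1))) = true) := by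
      intro hb
      have h0 := (pv_sing_prefix c (t.drop (j + 1))).mp hb
      obtain ⟨hl, he⟩ := List.getElem?_eq_some_iff.mp h0
      exact h (List.mem_of_mem_drop (he ▸ List.getElem_mem hl))
    rw [if_neg hpre]
    exact ih

theorem pv_rfind_go_some (t : List Char) (c : Char) (m : Nat) (h1 : t[m]? = some c)
    (h2 : ∀ i, m < i → t[i]? ≠ some c) :
    ∀ j : Nat, m ≤ j → PySem.Chars.rfind.go t [c] j = (m : Int) := by
  intro j
  induction j with
  | zero =>
    intro hm
    have hm0 : m = 0 := by omega
    rw [PySem.Chars.rfind.go]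
    have hpre : ([c].isPrefixOf t) = true := (pv_sing_prefix c t).mpr (hm0 ▸ h1)
    rw [if_pos hpre, hm0]
    simp
  | succ j ih =>
    intro hm
    rw [PySem.Chars.rfind.go]
    by_cases he : m = j + 1
    · have hd : t[j + 1]? = some c := he ▸ h1
      have hpre : ([c].isPrefixOf (t.drop (j + 1))) = true := by
        rw [pv_sing_prefix, List.getElem?_drop]
        simpa using hd
      rw [if_pos hpre]
      simp [he]
    · have hmj : m ≤ j := by omega
      have hpre : ¬ (([c].isPrefixOf (t.drop (j + 1))) = true) := by
        intro hb
        have h0 := (pv_sing_prefix c (t.drop (j + 1))).mp hb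
        rw [List.getElem?_drop] at h0
        exact h2 (j + 1 + 0) (by omega) h0
      rw [if_neg hpre]
      exact ih hmj

theorem pv_rfind_some (t : List Char) (c : Char) (m : Nat) (h1 : t[m]? = some c)
    (h2 : ∀ i, m < i → t[i]? ≠ some c) : PySem.Chars.rfind t [c] = (m : Int) := by
  unfold PySem.Chars.rfind
  have hm : m < t.length := (List.getElem?_eq_some_iff.mp h1).1
  exact pv_rfind_go_some t c m h1 h2 t.length (by omega)

theorem pv_rfind_none (t : List Char) (c : Char) (h : c ∉ t) : PySem.Chars.rfind t [c] = -1 := by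
  unfold PySem.Chars.rfind
  exact pv_rfind_go_none t c h t.length

-- rfindFrom with bounds 0..rp (0 ≤ rp ≤ len) is rfind on the prefix
theorem pv_rfindFrom_eq (s : List Char) (c : Char) (rp : Nat) (h : rp ≤ s.length) :
    PySem.Chars.rfindFrom s [c] 0 (some (rp : Int)) = PySem.Chars.rfind (s.take rp) [c] := by
  unfold PySem.Chars.rfindFrom
  have h1 : ¬ ((s.length : Int) < (rp : Int)) := by exact_mod_cast not_lt.mpr h
  have h2 : ¬ ((rp : Int) < 0) := by omega
  have h3 : ¬ ((0 : Int) < 0) := by omega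
  simp only [h1, h2, h3, if_false, Int.toNat_natCast, Int.toNat_zero, List.drop_zero]
  by_cases hr : PySem.Chars.rfind (s.take rp) [c] = -1
  · simp [hr]
  · simp [hr]

-- ===== A-side loop characterizations =====
theorem pv_isFuncLoop_none (s : List Char) (h : ')' ∉ s) :
    ∀ (k pos : Nat) (temp stack : List Char), s.length - pos ≤ k →
      isFuncLoop s pos temp stack = (false, -1) := by
  intro k
  induction k with
  | zero =>
    intro pos temp stack hk
    rw [isFuncLoop]
    rw [dif_neg (by omega)]
  | succ k ih =>
    intro pos temp stack hk
    rw [isFuncLoop]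
    by_cases hp : pos < s.length
    · rw [dif_pos hp]
      have hnr : ¬ (s[pos] = ')') := fun he => h (he ▸ List.getElem_mem hp)
      by_cases hl : s[pos] = '('
      · rw [if_pos hl]; exact ih (pos + 1) [] (stack ++ ['(']) (by omega)
      · rw [if_neg hl, if_neg hnr]; exact ih (pos + 1) _ stack (by omega)
    · rw [dif_neg hp]

-- running through a window with no '(' and no ')' up to the ')' at rp
theorem pv_isFuncLoop_run (s : List Char) (rp : Nat) (hrc : s[rp]? = some ')') :
    ∀ (k pos : Nat) (temp stack : List Char), rp - pos ≤ k → pos ≤ rp →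
      (∀ i, pos ≤ i → i < rp → s[i]? ≠ some ')' ∧ s[i]? ≠ some '(') →
      isFuncLoop s pos temp stack = (true, (pos : Int) - (temp.length : Int)) := by
  have hrl : rp < s.length := (List.getElem?_eq_some_iff.mp hrc).1
  intro k
  induction k with
  | zero =>
    intro pos temp stack hk hpr _
    have hpe : pos = rp := by omega
    subst hpe
    rw [isFuncLoop, dif_pos hrl]
    have hc : s[pos] = ')' := by
      have := List.getElem?_eq_getElem hrl
      rw [this] at hrc; exact Option.some.inj hrc
    rw [if_neg (by rw [hc]; decide), if_pos hc]
  | succ k ih =>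
    intro pos temp stack hk hpr hw
    by_cases hpe : pos = rp
    · subst hpe
      rw [isFuncLoop, dif_pos hrl]
      have hc : s[pos] = ')' := by
        have := List.getElem?_eq_getElem hrl
        rw [this] at hrc; exact Option.some.inj hrc
      rw [if_neg (by rw [hc]; decide), if_pos hc]
    · have hp : pos < rp := by omega
      have hpl : pos < s.length := by omega
      obtain ⟨hnr, hnl⟩ := hw pos (by omega) hp
      rw [List.getElem?_eq_getElem hpl] at hnr hnl
      rw [isFuncLoop, dif_pos hpl]
      rw [if_neg (fun he => hnl (by rw [he])), if_neg (fun he => hnr (by rw [he]))]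
      have := ih (pos + 1) (temp ++ [s[pos]]) stack (by omega) (by omega)
        (fun i hi1 hi2 => hw i (by omega) hi2)
      rw [this]
      simp only [List.length_append, List.length_singleton]
      push_cast
      ring

-- running from pos ≤ m up to the last '(' at m (m < rp, first ')' at rp)
theorem pv_isFuncLoop_toParen (s : List Char) (rp m : Nat) (hrc : s[rp]? = some ')')
    (hrf : ∀ i, i < rp → s[i]? ≠ some ')') (hmr : m < rp) (hmc : s[m]? = some '(')
    (hml : ∀ i, m < i → i < rp → s[i]? ≠ some '(') :
    ∀ (k pos : Nat) (temp stack : List Char), m - pos ≤ k → pos ≤ m →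
      isFuncLoop s pos temp stack = (true, (m : Int) + 1) := by
  have hrl : rp < s.length := (List.getElem?_eq_some_iff.mp hrc).1
  have hstep : ∀ (temp stack : List Char), isFuncLoop s m temp stack = (true, (m : Int) + 1) := by
    intro temp stack
    have hml' : m < s.length := by omega
    have hmc' : s[m] = '(' := by
      rw [List.getElem?_eq_getElem hml'] at hmc; exact Option.some.inj hmc
    rw [isFuncLoop, dif_pos hml', if_pos hmc']
    have := pv_isFuncLoop_run s rp hrc rp (m + 1) [] (stack ++ ['(']) (by omega) (by omega)
      (fun i hi1 hi2 => ⟨hrf i hi2, hml i (by omega) hi2⟩)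
    rw [this]
    simp
  intro k
  induction k with
  | zero =>
    intro pos temp stack hk hpm
    have : pos = m := by omega
    subst this; exact hstep temp stack
  | succ k ih =>
    intro pos temp stack hk hpm
    by_cases hpe : pos = m
    · subst hpe; exact hstep temp stack
    · have hp : pos < m := by omega
      have hpl : pos < s.length := by omega
      have hnr : s[pos] ≠ ')' := by
        have := hrf pos (by omega)
        rw [List.getElem?_eq_getElem hpl] at this
        exact fun he => this (by rw [he])
      rw [isFuncLoop, dif_pos hpl]
      by_cases hl : s[pos] = '('
      · rw [if_pos hl]; exact ih (pos + 1) [] (stack ++ ['(']) (by omega) (by omega)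
      · rw [if_neg hl, if_neg hnr]; exact ih (pos + 1) _ stack (by omega) (by omega)

-- the inner while loop of is_var collects the window [pos, rp)
theorem pv_isVarLoop (s : List Char) (rp : Nat) (hrc : s[rp]? = some ')')
    (hrf : ∀ i, i < rp → s[i]? ≠ some ')') :
    ∀ (k pos : Nat) (temp : List Char), rp - pos ≤ k → pos ≤ rp →
      isVarLoop s pos temp = temp ++ (s.take rp).drop pos := by
  have hrl : rp < s.length := (List.getElem?_eq_some_iff.mp hrc).1
  have hstop : ∀ temp : List Char, isVarLoop s rp temp = temp ++ (s.take rp).drop rp := by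
    intro temp
    have hrc' : s[rp] = ')' := by
      rw [List.getElem?_eq_getElem hrl] at hrc; exact Option.some.inj hrc
    rw [isVarLoop, dif_pos hrl, if_pos hrc']
    have hnil : (s.take rp).drop rp = [] := by
      apply List.drop_eq_nil_of_le
      rw [List.length_take]; omega
    rw [hnil, List.append_nil]
  intro k
  induction k with
  | zero =>
    intro pos temp hk hpr
    have : pos = rp := by omega
    subst this; exact hstop temp
  | succ k ih =>
    intro pos temp hk hpr
    by_cases hpe : pos = rp
    · subst hpe; exact hstop temp
    · have hp : pos < rp := by omega
      have hpl : pos < s.length := by omega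
      have hnr : s[pos] ≠ ')' := by
        have := hrf pos hp
        rw [List.getElem?_eq_getElem hpl] at this
        exact fun he => this (by rw [he])
      rw [isVarLoop, dif_pos hpl, if_neg hnr]
      rw [ih (pos + 1) (temp ++ [s[pos]]) (by omega) (by omega)]
      have hd : (s.take rp).drop pos = s[pos] :: (s.take rp).drop (pos + 1) := by
        have hplt : pos < (s.take rp).length := by rw [List.length_take]; omega
        rw [List.drop_eq_getElem_cons hplt]
        congr 1
        simp [List.getElem_take]
      rw [hd]
      simp

-- ===== main equivalence =====
theorem pv_main (para : String) : is_var para = is_var_alt para := by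
  by_cases h4 : para.toList.length < 4
  · -- short string: A's is_function refuses, B's length test fires
    have h4' : para.length < 4 := by simpa using h4
    simp [is_var, is_var_alt, is_function, h4']
  · by_cases hin : ')' ∈ para.toList
    · obtain ⟨rp, hrc, hrf⟩ := pv_exists_first para.toList ')' hin
      have hrl : rp < para.toList.length := (List.getElem?_eq_some_iff.mp hrc).1
      have hfind : PySem.Chars.find para.toList [')'] = (rp : Int) := pv_find_some _ _ rp hrc hrf
      have hcond : ¬ ((rp : Int) = -1 ∨ para.toList.length < 4) := by
        rw [not_or]
        exact ⟨by omega, h4⟩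
      by_cases hpin : '(' ∈ para.toList.take rp
      · -- a '(' occurs before the first ')'
        obtain ⟨m, hmc, hml⟩ := pv_exists_last (para.toList.take rp) '(' hpin
        have hmr : m < rp := by
          have := (List.getElem?_eq_some_iff.mp hmc).1
          rw [List.length_take] at this; omega
        have hmc' : para.toList[m]? = some '(' := by
          rw [List.getElem?_take_of_lt hmr] at hmc; exact hmc
        have hml' : ∀ i, m < i → i < rp → para.toList[i]? ≠ some '(' := by
          intro i hi1 hi2
          have := hml i hi1
          rw [List.getElem?_take_of_lt hi2] at this; exact this
        have hA : is_function para.toList = (true, (m : Int) + 1) := by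
          unfold is_function
          rw [if_neg h4]
          exact pv_isFuncLoop_toParen para.toList rp m hrc hrf hmr hmc' hml' m 0 [] [] (by omega) (by omega)
        have hrfind : PySem.Chars.rfind (para.toList.take rp) ['('] = (m : Int) :=
          pv_rfind_some _ _ m hmc hml
        have hVL : isVarLoop para.toList (m + 1) [] = (para.toList.take rp).drop (m + 1) := by
          have := pv_isVarLoop para.toList rp hrc hrf (rp - (m + 1)) (m + 1) [] (by omega) (by omega)
          simpa using this
        have hslice : PySem.List.slice para.toList (some ((m : Int) + 1)) (some (rp : Int))
            = (para.toList.take rp).drop (m + 1) := by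
          have hc : ((m : Int) + 1) = ((m + 1 : Nat) : Int) := by push_cast; ring
          rw [hc, PySem.List.slice_natCast, List.drop_take]
        have htn : ((m : Int) + 1).toNat = m + 1 := by omega
        simp only [is_var, is_var_alt]
        rw [hA, hfind, if_neg hcond, pv_rfindFrom_eq para.toList '(' rp (le_of_lt hrl), hrfind,
          hslice]
        simp [htn, hVL]
      · -- no '(' before the first ')': content starts at 0
        have hwin : ∀ i, 0 ≤ i → i < rp → para.toList[i]? ≠ some ')' ∧ para.toList[i]? ≠ some '(' := by
          intro i _ hi
          refine ⟨hrf i hi, fun he => hpin ?_⟩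
          have hti : (para.toList.take rp)[i]? = some '(' := by
            rw [List.getElem?_take_of_lt hi]; exact he
          obtain ⟨hl, hg⟩ := List.getElem?_eq_some_iff.mp hti
          exact hg ▸ List.getElem_mem hl
        have hA : is_function para.toList = (true, (0 : Int)) := by
          unfold is_function
          rw [if_neg h4]
          have := pv_isFuncLoop_run para.toList rp hrc rp 0 [] [] (by omega) (by omega) hwin
          simpa using this
        have hrfind : PySem.Chars.rfind (para.toList.take rp) ['('] = -1 :=
          pv_rfind_none _ _ hpin
        have hVL : isVarLoop para.toList 0 [] = para.toList.take rp := by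
          have := pv_isVarLoop para.toList rp hrc hrf rp 0 [] (by omega) (by omega)
          simpa using this
        have hslice : PySem.List.slice para.toList (some ((-1 : Int) + 1)) (some (rp : Int))
            = para.toList.take rp := by
          have hc : ((-1 : Int) + 1) = ((0 : Nat) : Int) := by norm_num
          rw [hc, PySem.List.slice_natCast]
          simp
        simp only [is_var, is_var_alt]
        rw [hA, hfind, if_neg hcond, pv_rfindFrom_eq para.toList '(' rp (le_of_lt hrl), hrfind,
          hslice]
        simp [hVL]
    · -- no ')' at all: both take the plain-variable branch
      have hA : is_function para.toList = (false, -1) := by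
        unfold is_function
        rw [if_neg h4]
        exact pv_isFuncLoop_none para.toList hin para.toList.length 0 [] [] (by omega)
      have hfind : PySem.Chars.find para.toList [')'] = -1 := pv_find_none _ _ hin
      simp [is_var, is_var_alt, hA, hfind]

-- ===== VERDICT (by name: the statement is the Claim_ definition above) =====
theorem is_var_spec : Claim_equal_is_var := by
  intro para _
  unfold Spec_is_var
  exact pv_main para
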